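-- pv_equiv track=rewrite | github.com/shixuekai08/alltools | release/Stringer.py | AddSequence
-- ===== SOURCE A (Python) =====
-- def AddSequence(string):
--     count = 2
--     s = "1 "
--     for x in string:
--         if x == "\n":
--             s += "\n"+str(count)+" "
--             count = count + 1
--         else:
--             s += x
--
--     return s
-- ===== SOURCE B (Python) =====
-- def AddSequence(string):
--     lines = string.split("\n")
--     return "\n".join("%d %s" % (i + 1, line) for i, line in enumerate(lines))
-- ===== Notes on version B (the rewrite author's own statement) =====
-- stated objective: idiomatic
-- what changed: B splits the input into whole lines once and rebuilds the result by joining the enumerated, numbered lines, instead of A's character-by-character scan with a running counter and repeated string concatenation.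
import Mathlib
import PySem

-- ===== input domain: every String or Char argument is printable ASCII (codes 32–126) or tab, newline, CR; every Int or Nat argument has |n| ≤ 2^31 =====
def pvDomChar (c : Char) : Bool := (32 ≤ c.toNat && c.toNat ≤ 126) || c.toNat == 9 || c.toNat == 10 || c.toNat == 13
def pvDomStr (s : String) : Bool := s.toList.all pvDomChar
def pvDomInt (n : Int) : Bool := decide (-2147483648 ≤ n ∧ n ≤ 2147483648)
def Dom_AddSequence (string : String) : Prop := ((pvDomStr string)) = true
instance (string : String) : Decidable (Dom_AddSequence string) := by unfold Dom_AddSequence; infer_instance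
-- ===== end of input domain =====

-- B rebuilds the numbered text by split("\n") + enumerate + join instead of A's per-character scan (idiomatic decomposition; return value equivalence).


-- ===== PORT A =====
-- A's loop state: (count, s); strings carried as List Char (exact code-point representation).
def pvAStep (st : Int × List Char) (x : Char) : Int × List Char :=
  if x = '\n' then (st.1 + 1, st.2 ++ '\n' :: (PySem.Int.toStr st.1).toList ++ [' '])
  else (st.1, st.2 ++ [x])

def AddSequence (string : String) : String :=
  String.ofList (string.toList.foldl pvAStep (2, ['1', ' '])).2

-- ===== PORT B =====
def AddSequence_alt (string : String) : String :=
  let lines := PySem.Chars.splitOn string.toList ['\n']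
  String.ofList (PySem.Chars.join ['\n']
    ((PySem.List.enumerate lines 0).map
      (fun p => (PySem.Int.toStr (p.1 + 1)).toList ++ ' ' :: p.2)))

-- ===== PRECONDITION & SPEC =====
def Spec_AddSequence (string : String) (out : String) : Prop := out = AddSequence_alt string
instance (string : String) (out : String) : Decidable (Spec_AddSequence string out) := by unfold Spec_AddSequence; infer_instance

-- ===== CLAIM (what is proved, stated in full; the proofs are below) =====
def Claim_equal_AddSequence : Prop := ∀ (string : String), Dom_AddSequence string → Spec_AddSequence string (AddSequence string)

-- ===== LEMMAS AND PROOFS =====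

-- the numbered suffix A's loop appends after "1 ", starting the counter at c
def pvSeqFrom (c : Int) : List Char → List Char
  | [] => []
  | x :: r =>
    if x = '\n' then '\n' :: (PySem.Int.toStr c).toList ++ ' ' :: pvSeqFrom (c + 1) r
    else x :: pvSeqFrom c r

-- clean structural form of PySem.Chars.splitOn on separator "\n"
def pvSplit : List Char → List Char → List (List Char)
  | [], cur => [cur.reverse]
  | c :: rest, cur =>
    if c = '\n' then cur.reverse :: pvSplit rest []
    else pvSplit rest (c :: cur)

theorem pvSplit_ne_nil (l cur : List Char) : pvSplit l cur ≠ [] := by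
  induction l generalizing cur with
  | nil => simp [pvSplit]
  | cons c rest ih =>
    simp only [pvSplit]
    split_ifs <;> simp [ih]

theorem pvGoEq (fuel : Nat) (l cur : List Char) (acc : List (List Char))
    (h : l.length ≤ fuel) :
    PySem.Chars.splitOn.go ['\n'] fuel l cur acc = acc.reverse ++ pvSplit l cur := by
  induction fuel generalizing l cur acc with
  | zero =>
    have hl : l = [] := List.eq_nil_of_length_eq_zero (Nat.le_zero.mp h)
    subst hl
    simp [PySem.Chars.splitOn.go, pvSplit]
  | succ n ih =>
    cases l with
    | nil => simp [PySem.Chars.splitOn.go, pvSplit]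
    | cons c rest =>
      simp only [PySem.Chars.splitOn.go, pvSplit]
      by_cases hc : c = '\n'
      · subst hc
        have hpre : List.isPrefixOf ['\n'] ('\n' :: rest) = true := by
          simp [List.isPrefixOf]
        simp only [hpre, if_true, List.length_cons, List.length_nil, List.drop_succ_cons, List.drop_zero]
        rw [ih rest [] (cur.reverse :: acc) (by simpa using Nat.le_of_succ_le_succ h)]
        simp
      · have hpre : List.isPrefixOf ['\n'] (c :: rest) = false := by
          simp [List.isPrefixOf, BEq.beq]
          intro hh; exact absurd hh.symm hc
        simp only [hpre, Bool.false_eq_true, if_false, hc]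
        exact ih rest (c :: cur) acc (Nat.le_of_succ_le_succ h)

theorem pvSplitOn_eq (l : List Char) : PySem.Chars.splitOn l ['\n'] = pvSplit l [] := by
  unfold PySem.Chars.splitOn
  simpa using pvGoEq (l.length + 1) l [] [] (Nat.le_succ _)

-- A's loop computes the numbered suffix
theorem pvA_foldl (l : List Char) (c : Int) (s : List Char) :
    (l.foldl pvAStep (c, s)).2 = s ++ pvSeqFrom c l := by
  induction l generalizing c s with
  | nil => simp [pvSeqFrom]
  | cons x r ih =>
    simp only [List.foldl_cons, pvAStep, pvSeqFrom]
    by_cases hx : x = '\n'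
    · subst hx; simp only [if_true]
      rw [ih]; simp
    · simp only [hx, if_false]
      rw [ih]; simp

-- B's join over the numbered enumerated split pieces
theorem pvB_join (l cur : List Char) (s : Int) :
    PySem.Chars.join ['\n']
      ((PySem.List.enumerate (pvSplit l cur) s).map
        (fun p => (PySem.Int.toStr (p.1 + 1)).toList ++ ' ' :: p.2))
    = (PySem.Int.toStr (s + 1)).toList ++ ' ' :: (cur.reverse ++ pvSeqFrom (s + 2) l) := by
  induction l generalizing cur s with
  | nil =>
    simp [pvSplit, PySem.List.enumerate, PySem.Chars.join, List.intercalate, pvSeqFrom]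
  | cons x r ih =>
    by_cases hx : x = '\n'
    · subst hx
      simp only [pvSplit, if_true]
      obtain ⟨m, mrest, hm⟩ : ∃ m mrest, pvSplit r [] = m :: mrest := by
        cases hsp : pvSplit r [] with
        | nil => exact absurd hsp (pvSplit_ne_nil r [])
        | cons m mrest => exact ⟨m, mrest, rfl⟩
      have ihr := ih [] (s + 1)
      rw [hm] at ihr ⊢
      simp only [PySem.List.enumerate_cons, List.map_cons] at ihr ⊢
      rw [PySem.Chars.join_cons_cons]
      rw [ihr]
      simp only [pvSeqFrom, if_true]
      have h2 : s + 1 + 1 = s + 2 := by ring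
      have h3 : s + 1 + 2 = s + 2 + 1 := by ring
      rw [h2, h3]
      simp
    · simp only [pvSplit, hx, if_false]
      rw [ih (x :: cur) s]
      simp only [pvSeqFrom, hx, if_false, List.reverse_cons]
      simp

-- ===== VERDICT (by name: the statement is the Claim_ definition above) =====
theorem AddSequence_spec : Claim_equal_AddSequence := by
  intro string _
  unfold Spec_AddSequence AddSequence AddSequence_alt
  simp only [pvSplitOn_eq]
  rw [pvA_foldl, pvB_join]
  have h1 : ((0:Int) + 1) = 1 := by norm_num
  have h2 : ((0:Int) + 2) = 2 := by norm_num
  have h3 : (PySem.Int.toStr 1).toList = ['1'] := by decide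
  rw [h1, h2, h3]
  simp
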